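-- pv_equiv track=rewrite | github.com/zackmdavis/Exercises_A | Advent_of_Code/2015/day_11.py | has_straight
-- ===== SOURCE A (Python) =====
-- def has_straight(password):
--     straight_counter = 0
--     for i in range(len(password)-1):
--         if ord(password[i+1]) - ord(password[i]) == 1:
--             straight_counter += 1
--             if straight_counter == 3:
--                 return True
--         else:
--             straight_counter = 0
--     return False
-- ===== SOURCE B (Python) =====
-- def has_straight(password):
--     pattern = ''.join(
--         '1' if ord(password[i + 1]) - ord(password[i]) == 1 else '0'
--         for i in range(len(password) - 1))
--     return '111' in pattern
-- ===== Notes on version B (the rewrite author's own statement) =====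
-- stated objective: alternative
-- what changed: B precomputes the adjacent-difference pattern of the password as a binary string in one pass and then detects the straight by searching that string for a run of three set digits, instead of A's single loop with a resetting counter and early return.
import Mathlib
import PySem

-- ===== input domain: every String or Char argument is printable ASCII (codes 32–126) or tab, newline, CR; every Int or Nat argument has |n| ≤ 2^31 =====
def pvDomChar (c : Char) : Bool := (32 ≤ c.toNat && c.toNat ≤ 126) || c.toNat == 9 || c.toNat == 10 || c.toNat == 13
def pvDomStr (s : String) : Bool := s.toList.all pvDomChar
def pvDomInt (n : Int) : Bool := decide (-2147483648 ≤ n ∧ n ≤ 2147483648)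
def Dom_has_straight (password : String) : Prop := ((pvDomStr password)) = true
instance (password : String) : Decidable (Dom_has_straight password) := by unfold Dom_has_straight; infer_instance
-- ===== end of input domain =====

-- B builds the adjacent-difference pattern as a '0'/'1' string and searches it for '111',
-- instead of A's single resetting-counter loop with early return (alternative decomposition).

-- ===== PORT A =====
-- the for-loop with early return, as recursion over the index list; c is straight_counter
def hasStraightGo (cs : List Char) : List Int → Int → Bool
  | [], _ => false
  | i :: rest, c =>
    if ((PySem.List.pyGetD cs (i + 1) ' ').toNat : Int) - ((PySem.List.pyGetD cs i ' ').toNat : Int) == 1 then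
      if c + 1 == 3 then true else hasStraightGo cs rest (c + 1)
    else hasStraightGo cs rest 0

def has_straight (password : String) : Bool :=
  hasStraightGo password.toList
    (PySem.List.pyRange 0 ((password.toList.length : Int) - 1) 1) 0

-- ===== PORT B =====
-- ''.join of single '1'/'0' characters over range(len-1) is exactly this character list
def has_straight_alt (password : String) : Bool :=
  let cs := password.toList
  let pattern : List Char :=
    (PySem.List.pyRange 0 ((cs.length : Int) - 1) 1).map (fun i =>
      if ((PySem.List.pyGetD cs (i + 1) ' ').toNat : Int) - ((PySem.List.pyGetD cs i ' ').toNat : Int) == 1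
      then '1' else '0')
  PySem.Chars.isIn ['1', '1', '1'] pattern

-- ===== PRECONDITION & SPEC =====
def Spec_has_straight (password : String) (out : Bool) : Prop := out = has_straight_alt password
instance (password : String) (out : Bool) : Decidable (Spec_has_straight password out) := by unfold Spec_has_straight; infer_instance

-- ===== CLAIM (what is proved, stated in full; the proofs are below) =====
def Claim_equal_has_straight : Prop := ∀ (password : String), Dom_has_straight password → Spec_has_straight password (has_straight password)

-- ===== LEMMAS AND PROOFS =====

-- A's loop over the bool pattern, abstracted
def straightLoop : List Bool → Int → Bool
  | [], _ => false
  | true :: rest, c => if c + 1 == 3 then true else straightLoop rest (c + 1)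
  | false :: rest, _ => straightLoop rest 0

lemma hasStraightGo_eq_straightLoop (cs : List Char) (l : List Int) (c : Int) :
    hasStraightGo cs l c =
      straightLoop (l.map (fun i =>
        ((PySem.List.pyGetD cs (i + 1) ' ').toNat : Int) - ((PySem.List.pyGetD cs i ' ').toNat : Int) == 1)) c := by
  induction l generalizing c with
  | nil => rfl
  | cons i rest ih =>
      simp only [hasStraightGo, List.map]
      by_cases h : (((PySem.List.pyGetD cs (i + 1) ' ').toNat : Int) - ((PySem.List.pyGetD cs i ' ').toNat : Int) == 1) = true
      · simp [h, straightLoop, ih]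
      · simp [eq_false_of_ne_true h, straightLoop, ih]

def boolCh (b : Bool) : Char := if b then '1' else '0'

lemma boolCh_injective : Function.Injective boolCh := by
  intro a b hab
  cases a <;> cases b <;> simp_all [boolCh]

lemma map_boolCh_infix_iff (l bs : List Bool) :
    l.map boolCh <:+: bs.map boolCh ↔ l <:+: bs := by
  constructor
  · intro h
    rcases List.infix_map_iff.mp h with ⟨l', hinf, heq⟩
    have : l = l' := List.map_injective_iff.mpr boolCh_injective heq
    exact this ▸ hinf
  · rintro ⟨s, t, h⟩
    exact ⟨s.map boolCh, t.map boolCh, by simp [← h]⟩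

lemma straightLoop_iff_infix (bs : List Bool) (c : Int) (h0 : 0 ≤ c) (h2 : c ≤ 2) :
    straightLoop bs c = true ↔
      (List.replicate (3 - c.toNat) true <+: bs ∨ [true, true, true] <:+: bs) := by
  induction bs generalizing c with
  | nil =>
      simp only [straightLoop]
      constructor
      · intro h; cases h
      · rintro (h | h)
        · have := h.length_le
          simp at this
          omega
        · have := h.length_le
          simp at this
  | cons b rest ih =>
      cases b
      · -- b = false
        simp only [straightLoop]
        rw [ih 0 le_rfl (by norm_num)]
        constructor
        · rintro (h | h)
          · right
            have : [true, true, true] <+: rest := by simpa [List.replicate] using h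
            exact List.infix_cons_iff.mpr (Or.inr this.isInfix)
          · exact Or.inr (List.infix_cons_iff.mpr (Or.inr h))
        · rintro (h | h)
          · exfalso
            have h3 : 1 ≤ 3 - c.toNat := by omega
            rcases Nat.exists_eq_add_of_le h3 with ⟨k, hk⟩
            rw [hk, List.replicate_add, List.replicate_one, List.singleton_append] at h
            exact absurd (List.cons_prefix_cons.mp h).1 (by simp)
          · rcases List.infix_cons_iff.mp h with h | h
            · exact absurd (List.cons_prefix_cons.mp h).1 (by simp)
            · exact Or.inr h
      · -- b = true
        simp only [straightLoop]
        by_cases hc : (c + 1 == 3) = true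
        · have hc' : c = 2 := by
            have : c + 1 = 3 := by simpa using hc
            omega
          subst hc'
          simp only [if_pos hc]
          constructor
          · intro _
            left
            exact List.cons_prefix_cons.mpr ⟨rfl, List.nil_prefix⟩
          · intro _; trivial
        · have hc2 : c ≤ 1 := by
            rcases lt_or_ge c 2 with h | h
            · omega
            · exfalso; apply hc; simp; omega
          rw [if_neg hc, ih (c + 1) (by omega) (by omega)]
          have h3 : 3 - c.toNat = (3 - (c + 1).toNat) + 1 := by omega
          constructor
          · rintro (h | h)
            · left
              rw [h3, List.replicate_succ]
              exact List.cons_prefix_cons.mpr ⟨rfl, h⟩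
            · right
              exact List.infix_cons_iff.mpr (Or.inr h)
          · rintro (h | h)
            · rw [h3, List.replicate_succ] at h
              exact Or.inl (List.cons_prefix_cons.mp h).2
            · rcases List.infix_cons_iff.mp h with h | h
              · left
                have h' : [true, true] <+: rest := (List.cons_prefix_cons.mp h).2
                have hle : 3 - (c + 1).toNat ≤ 2 := by omega
                have hsplit : List.replicate (3 - (c + 1).toNat) true ++
                    List.replicate (2 - (3 - (c + 1).toNat)) true = List.replicate 2 true := by
                  rw [← List.replicate_add]; congr 1; omega
                calc List.replicate (3 - (c + 1).toNat) true
                    <+: List.replicate 2 true := hsplit ▸ List.prefix_append _ _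
                  _ <+: rest := by simpa [List.replicate] using h'
              · exact Or.inr h

lemma straightLoop_zero_iff (bs : List Bool) :
    straightLoop bs 0 = true ↔ [true, true, true] <:+: bs := by
  rw [straightLoop_iff_infix bs 0 le_rfl (by norm_num)]
  constructor
  · rintro (h | h)
    · exact (by simpa [List.replicate] using h : [true,true,true] <+: bs).isInfix
    · exact h
  · intro h; exact Or.inr h

-- ===== VERDICT (by name: the statement is the Claim_ definition above) =====
theorem has_straight_spec : Claim_equal_has_straight := by
  intro password _
  unfold Spec_has_straight has_straight has_straight_alt
  set cs := password.toList
  set f : Int → Bool := fun i =>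
    ((PySem.List.pyGetD cs (i + 1) ' ').toNat : Int) - ((PySem.List.pyGetD cs i ' ').toNat : Int) == 1
  set idxs := PySem.List.pyRange 0 ((cs.length : Int) - 1) 1
  rw [hasStraightGo_eq_straightLoop]
  have hmap : idxs.map (fun i => if f i then '1' else '0') = (idxs.map f).map boolCh := by
    simp [boolCh, Function.comp]
  show straightLoop (idxs.map f) 0 = PySem.Chars.isIn ['1','1','1'] (idxs.map (fun i => if f i then '1' else '0'))
  rw [hmap]
  rcases hA : straightLoop (idxs.map f) 0 with _ | _
  · symm
    rw [PySem.Chars.isIn_eq_false_iff]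
    intro hinf
    have : [true, true, true].map boolCh <:+: (idxs.map f).map boolCh := by
      simpa [boolCh] using hinf
    have := (map_boolCh_infix_iff _ _).mp this
    rw [← straightLoop_zero_iff] at this
    rw [hA] at this
    exact absurd this (by simp)
  · symm
    rw [PySem.Chars.isIn_iff_infix]
    have := (straightLoop_zero_iff _).mp hA
    have := (map_boolCh_infix_iff [true,true,true] (idxs.map f)).mpr this
    simpa [boolCh] using this
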